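-- pv_equiv track=rewrite | github.com/Nghia03092004/nghia03092004.github.io | project_euler_unified/problem_817/solution.py | hensel_lift_roots
-- ===== SOURCE A (Python) =====
-- def hensel_lift_roots(p, k):
--     """Find all square roots of all QR mod p^k, returning dict: QR -> list of roots."""
--     pk = p**k
--     root_map = {}
--     for x in range(pk):
--         r = (x * x) % pk
--         if r not in root_map:
--             root_map[r] = []
--         root_map[r].append(x)
--     return root_map
-- ===== SOURCE B (Python) =====
-- def hensel_lift_roots(p, k):
--     """Find all square roots of all QR mod p^k, returning dict: QR -> list of roots.
--
--     Symmetry-halved scan: x and pk - x have the same square mod pk, so only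
--     x = 0 .. pk//2 are squared; each bucket is then completed by mirroring
--     its entries x -> pk - x (for 0 < x < pk - x) in descending-x order.
--     """
--     pk = p ** k
--     if pk == 0:
--         return {}
--     root_map = {}
--     for x in range(pk // 2 + 1):
--         root_map.setdefault(x * x % pk, []).append(x)
--     for roots in root_map.values():
--         roots += [pk - x for x in reversed(roots) if 0 < x < pk - x]
--     return root_map
-- ===== Notes on version B (the rewrite author's own statement) =====
-- stated objective: alternative
-- what changed: B exploits the symmetry x^2 = (pk-x)^2 mod pk: it squares only x = 0..pk//2 (half of A's range) to build the buckets, then completes each bucket by mirroring its entries x -> pk-x in descending order, instead of A's single full-range scan.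
import Mathlib
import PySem

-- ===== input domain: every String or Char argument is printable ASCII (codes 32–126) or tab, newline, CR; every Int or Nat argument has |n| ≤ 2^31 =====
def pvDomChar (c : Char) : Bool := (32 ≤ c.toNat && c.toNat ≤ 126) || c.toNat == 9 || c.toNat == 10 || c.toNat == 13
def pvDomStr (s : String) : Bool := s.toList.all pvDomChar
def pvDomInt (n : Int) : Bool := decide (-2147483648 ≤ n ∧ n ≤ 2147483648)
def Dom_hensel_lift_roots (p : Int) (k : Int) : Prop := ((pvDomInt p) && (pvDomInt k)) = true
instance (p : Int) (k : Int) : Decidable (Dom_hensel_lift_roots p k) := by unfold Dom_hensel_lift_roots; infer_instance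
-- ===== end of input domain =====

-- B exploits the symmetry x² ≡ (pk-x)² (mod pk): it squares only x = 0..pk//2 and then
-- completes each bucket by mirroring (objective: alternative, half the modular squarings).

-- ===== PORT A =====
def hensel_lift_roots (p : Int) (k : Int) : List (Int × List Int) :=
  let pk := p ^ k.toNat
  ((PySem.List.pyRange 0 pk 1).foldl
    (fun (d : PySem.Dict Int (List Int)) x =>
      let r := PySem.Int.mod (x * x) pk
      let d := if !d.contains r then d.insert r [] else d
      d.modify r [] (fun l => l ++ [x]))
    PySem.Dict.empty).items

-- ===== PORT B =====
def hensel_lift_roots_alt (p : Int) (k : Int) : List (Int × List Int) :=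
  let pk := p ^ k.toNat
  if pk = 0 then []
  else
    let d := (PySem.List.pyRange 0 (PySem.Int.floordiv pk 2 + 1) 1).foldl
      (fun (d : PySem.Dict Int (List Int)) x =>
        d.modify (PySem.Int.mod (x * x) pk) [] (fun l => l ++ [x]))
      PySem.Dict.empty
    d.items.map (fun rv =>
      (rv.1, rv.2 ++ (rv.2.reverse.filter (fun x => decide (0 < x ∧ x < pk - x))).map (fun x => pk - x)))

-- ===== PRECONDITION & SPEC =====
-- Python A raises on every k < 0 (p**k is a float there, so range() raises TypeError,
-- or ZeroDivisionError for p = 0); Pre_ admits exactly the inputs where A returns.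
def Pre_hensel_lift_roots (p : Int) (k : Int) : Prop := 0 ≤ k
instance (p : Int) (k : Int) : Decidable (Pre_hensel_lift_roots p k) := by unfold Pre_hensel_lift_roots; infer_instance
def pvWitness_hensel_lift_roots : Int × Int := (3, 2)
def Spec_hensel_lift_roots (p : Int) (k : Int) (out : List (Int × List Int)) : Prop := out = hensel_lift_roots_alt p k
instance (p : Int) (k : Int) (out : List (Int × List Int)) : Decidable (Spec_hensel_lift_roots p k out) := by unfold Spec_hensel_lift_roots; infer_instance

-- ===== CLAIM (what is proved, stated in full; the proofs are below) =====
def Claim_equal_hensel_lift_roots : Prop := ∀ (p : Int) (k : Int), Dom_hensel_lift_roots p k → Pre_hensel_lift_roots p k → Spec_hensel_lift_roots p k (hensel_lift_roots p k)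

-- ===== LEMMAS AND PROOFS =====

-- A's loop step ("insert an empty bucket if the key is new, then append") is one dict modify.
lemma step_eq_modify (pk : Int) (d : PySem.Dict Int (List Int)) (x : Int) :
    (let r := PySem.Int.mod (x * x) pk
     let d' := if !d.contains r then d.insert r [] else d
     d'.modify r [] (fun l => l ++ [x]))
    = d.modify (PySem.Int.mod (x * x) pk) [] (fun l => l ++ [x]) := by
  set r := PySem.Int.mod (x * x) pk
  by_cases h : d.contains r = true
  · simp [h]
  · simp only [Bool.not_eq_true] at h
    simp only [h, Bool.not_false, if_pos]
    simp [PySem.Dict.modify, PySem.Dict.getD_insert_self, PySem.Dict.insert_insert_self,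
      PySem.Dict.getD_of_not_contains d ([] : List Int) h]

-- A's whole loop is the plain modify-fold.
lemma foldA_eq (pk : Int) (xs : List Int) :
    xs.foldl
      (fun (d : PySem.Dict Int (List Int)) x =>
        let r := PySem.Int.mod (x * x) pk
        let d := if !d.contains r then d.insert r [] else d
        d.modify r [] (fun l => l ++ [x]))
      PySem.Dict.empty
    = xs.foldl (fun (d : PySem.Dict Int (List Int)) x =>
        d.modify (PySem.Int.mod (x * x) pk) [] (fun l => l ++ [x])) PySem.Dict.empty := by
  congr 1
  funext d x
  exact step_eq_modify pk d x

-- key order of a modify-fold grouping loop: first occurrences of the residues.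
lemma keys_fold (pk : Int) (xs : List Int) (d0 : PySem.Dict Int (List Int)) (h0 : d0.keys = []) :
    (xs.foldl (fun (d : PySem.Dict Int (List Int)) x =>
        d.modify (PySem.Int.mod (x * x) pk) [] (fun l => l ++ [x])) d0).keys
    = PySem.Set.ofList (xs.map (fun x => PySem.Int.mod (x * x) pk)) := by
  rw [PySem.Dict.keys_foldl_modify_key xs (fun x => PySem.Int.mod (x * x) pk) []
        (fun _ x => (fun l => l ++ [x])) d0, h0, PySem.Set.update_nil_left]

-- bucket contents of a modify-fold grouping loop from the empty dict.
lemma getD_fold (pk : Int) (xs : List Int) (c : Int) :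
    (xs.foldl (fun (d : PySem.Dict Int (List Int)) x =>
        d.modify (PySem.Int.mod (x * x) pk) [] (fun l => l ++ [x])) PySem.Dict.empty).getD c []
    = xs.filter (fun x => PySem.Int.mod (x * x) pk == c) := by
  have h := PySem.Dict.getD_foldl_modify_append
    (xs.map (fun x => (PySem.Int.mod (x * x) pk, x))) (PySem.Dict.empty : PySem.Dict Int (List Int)) c
  rw [List.foldl_map] at h
  simp only [h, PySem.Dict.getD_empty, List.nil_append, List.filter_map, List.map_map]
  simp [Function.comp_def]

-- items of a grouping fold, as a map over the occurring residues.
lemma items_fold (pk : Int) (xs : List Int) :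
    (xs.foldl (fun (d : PySem.Dict Int (List Int)) x =>
        d.modify (PySem.Int.mod (x * x) pk) [] (fun l => l ++ [x])) PySem.Dict.empty).items
    = (PySem.Set.ofList (xs.map (fun x => PySem.Int.mod (x * x) pk))).map
        (fun r => (r, xs.filter (fun x => PySem.Int.mod (x * x) pk == r))) := by
  set dA := xs.foldl (fun (d : PySem.Dict Int (List Int)) x =>
      d.modify (PySem.Int.mod (x * x) pk) [] (fun l => l ++ [x])) PySem.Dict.empty with hdA
  have hnd : dA.keys.Nodup := by
    rw [hdA]
    exact PySem.Dict.nodup_keys_foldl_modify_key xs (fun x => PySem.Int.mod (x * x) pk) []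
      (fun _ x => (fun l => l ++ [x])) PySem.Dict.empty (by simp [PySem.Dict.keys_empty])
  rw [PySem.Dict.items_eq_map_keys dA hnd ([] : List Int),
      hdA, keys_fold pk xs PySem.Dict.empty (by simp [PySem.Dict.keys_empty])]
  refine List.map_congr_left ?_
  intro r _
  rw [← hdA, hdA, getD_fold]

-- residue symmetry: (pk - y)² ≡ y² (mod pk).
lemma res_mirror (pk y : Int) :
    PySem.Int.mod ((pk - y) * (pk - y)) pk = PySem.Int.mod (y * y) pk := by
  have h : (pk - y) * (pk - y) = y * y + pk * (pk - 2 * y) := by ring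
  rw [h]
  by_cases hpk : pk = 0
  · simp [hpk]
  · simp [PySem.Int.mod]

-- interval reversal: reversing [a, b) and mirroring by c gives [c-b+1, c-a+1).
lemma reverse_map_pyRange (a b c : Int) :
    ((PySem.List.pyRange a b 1).reverse.map (fun x => c - x))
    = PySem.List.pyRange (c - b + 1) (c - a + 1) 1 := by
  apply List.ext_getElem
  · simp [PySem.List.length_pyRange_one]
  · intro i h1 h2
    simp only [List.getElem_map, List.getElem_reverse, PySem.List.getElem_pyRange_one]
    simp only [List.length_map, List.length_reverse, PySem.List.length_pyRange_one] at h1 h2 ⊢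
    omega

-- absorbing update: adding only already-present elements changes nothing.
lemma set_update_absorb (s l : List Int) (h : ∀ x ∈ l, x ∈ s) : PySem.Set.update s l = s := by
  rw [PySem.Set.update_eq_append_filter]
  have : (PySem.Set.ofList l).filter (fun y => !(PySem.Set.contains s y)) = [] := by
    rw [List.filter_eq_nil_iff]
    intro a ha
    have hm : a ∈ s := h a ((PySem.Set.mem_ofList _ _).mp ha)
    simp [hm]
  rw [this, List.append_nil]

-- ===== VERDICT (by name: the statement is the Claim_ definition above) =====
theorem hensel_lift_roots_spec : Claim_equal_hensel_lift_roots := by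
  intro p k _ _
  unfold Spec_hensel_lift_roots hensel_lift_roots hensel_lift_roots_alt
  dsimp only
  rw [foldA_eq]
  set pk := p ^ k.toNat with hpk
  by_cases hz : pk = 0
  · rw [if_pos hz, PySem.List.pyRange_one_eq_nil (le_of_eq hz)]
    rfl
  · rw [if_neg hz]
    by_cases hp : pk ≤ 0
    · have hfd : PySem.Int.floordiv pk 2 < 0 :=
        (PySem.Int.floordiv_lt_iff_lt_mul (by omega)).mpr (by omega)
      rw [PySem.List.pyRange_one_eq_nil hp,
          PySem.List.pyRange_one_eq_nil (by omega : PySem.Int.floordiv pk 2 + 1 ≤ 0)]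
      rfl
    have hp0 : 0 < pk := by omega
    set h := PySem.Int.floordiv pk 2 with hh
    have hb : h * 2 ≤ pk ∧ pk < (h + 1) * 2 :=
      (PySem.Int.floordiv_eq_iff_of_pos (by omega)).mp hh.symm
    set m := pk - h with hm
    rw [PySem.List.pyRange_one_append 0 (h + 1) pk (by omega) (by omega)]
    set xsH := PySem.List.pyRange 0 (h + 1) 1 with hxsH
    set xsT := PySem.List.pyRange (h + 1) pk 1 with hxsT
    rw [items_fold, items_fold]
    have hkeys : PySem.Set.ofList ((xsH ++ xsT).map (fun x => PySem.Int.mod (x * x) pk))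
        = PySem.Set.ofList (xsH.map (fun x => PySem.Int.mod (x * x) pk)) := by
      rw [List.map_append, PySem.Set.ofList_append]
      refine set_update_absorb _ _ ?_
      intro y hy
      obtain ⟨x, hx, rfl⟩ := List.mem_map.mp hy
      rw [hxsT] at hx
      have hxb := (PySem.List.mem_pyRange_one).mp hx
      refine (PySem.Set.mem_ofList _ _).mpr
        (List.mem_map.mpr ⟨pk - x, ?_, res_mirror pk x⟩)
      rw [hxsH]
      exact (PySem.List.mem_pyRange_one).mpr (by omega)
    rw [hkeys, List.map_map]
    refine List.map_congr_left ?_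
    intro r _
    simp only [Function.comp_def, Prod.mk.injEq, true_and]
    rw [List.filter_append]
    refine congrArg _ ?_
    -- the tail part of the bucket is the mirrored front part
    rw [List.filter_reverse, List.filter_filter]
    have hsplit : xsH = PySem.List.pyRange 0 1 1 ++ PySem.List.pyRange 1 m 1
        ++ PySem.List.pyRange m (h + 1) 1 := by
      rw [hxsH, PySem.List.pyRange_one_append 0 1 (h + 1) (by omega) (by omega),
          PySem.List.pyRange_one_append 1 m (h + 1) (by omega) (by omega), List.append_assoc]
    rw [hsplit, List.filter_append, List.filter_append]
    have h0 : (PySem.List.pyRange 0 1 1).filter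
        (fun x => decide (0 < x ∧ x < pk - x) && (PySem.Int.mod (x * x) pk == r)) = [] := by
      rw [List.filter_eq_nil_iff]
      intro x hx
      have := (PySem.List.mem_pyRange_one).mp hx
      simp only [Bool.and_eq_true, decide_eq_true_eq, not_and]
      intro hc
      omega
    have h2 : (PySem.List.pyRange m (h + 1) 1).filter
        (fun x => decide (0 < x ∧ x < pk - x) && (PySem.Int.mod (x * x) pk == r)) = [] := by
      rw [List.filter_eq_nil_iff]
      intro x hx
      have := (PySem.List.mem_pyRange_one).mp hx
      simp only [Bool.and_eq_true, decide_eq_true_eq, not_and]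
      intro hc
      omega
    have h1 : (PySem.List.pyRange 1 m 1).filter
        (fun x => decide (0 < x ∧ x < pk - x) && (PySem.Int.mod (x * x) pk == r))
        = (PySem.List.pyRange 1 m 1).filter (fun x => PySem.Int.mod (x * x) pk == r) := by
      refine List.filter_congr ?_
      intro x hx
      have := (PySem.List.mem_pyRange_one).mp hx
      have hcnd : decide (0 < x ∧ x < pk - x) = true := by
        simp only [decide_eq_true_eq]
        omega
      rw [hcnd, Bool.true_and]
    rw [h0, h1, h2, List.nil_append, List.append_nil]
    -- mirror the middle interval onto the tail interval
    rw [← List.filter_reverse]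
    have hfun : (fun x : Int => PySem.Int.mod (x * x) pk == r)
        = ((fun y : Int => PySem.Int.mod (y * y) pk == r) ∘ (fun x : Int => pk - x)) := by
      funext x
      simp only [Function.comp_apply, res_mirror pk x]
    rw [hfun, ← List.filter_map, reverse_map_pyRange 1 m pk]
    have e1 : pk - m + 1 = h + 1 := by omega
    have e2 : pk - 1 + 1 = pk := by omega
    rw [e1, e2, ← hfun]
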